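-- pv_equiv track=rewrite | github.com/OH-Neuri/Algorithm-Solving | 프로그래머스/lv2/42587. 프로세스/프로세스.py | solution
-- ===== SOURCE A (Python) =====
-- from collections import deque
--
-- def solution(priorities, location):
--
--     answer = 0
--     queue = deque(priorities)
--
--     while queue:
--         m = max(queue)
--         l = queue.popleft()
--         location -=1
--         # 우선순위 낮을경우
--         if l != m:
--             queue.append(l)
--             if location <0:
--                 location = len(queue)-1
--         # 우선순위일 경우
--         else:
--             answer+=1
--             if location < 0:
--                 break
--     return answer
-- ===== SOURCE B (Python) =====
-- from collections import deque
--
-- def solution(priorities, location):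
--     # B: the jobs are printed in descending priority order, so iterate over the
--     # descending sort once; for each value, rotate the queue up to its next
--     # occurrence and pop it.  A's per-iteration max() rescan disappears.
--     queue = deque(priorities)
--     answer = 0
--     for top in sorted(priorities, reverse=True):
--         while queue[0] != top:
--             queue.append(queue.popleft())
--             location -= 1
--             if location < 0:
--                 location = len(queue) - 1
--         queue.popleft()
--         location -= 1
--         answer += 1
--         if location < 0:
--             return answer
--     return answer
-- ===== Notes on version B (the rewrite author's own statement) =====
-- stated objective: faster
-- what changed: B iterates once over the precomputed descending sort of the priorities (for each value: rotate the queue to its next occurrence and pop it), so A's O(n) max() rescan on every queue pop and its per-element compare-to-max branch disappear.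
import Mathlib
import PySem

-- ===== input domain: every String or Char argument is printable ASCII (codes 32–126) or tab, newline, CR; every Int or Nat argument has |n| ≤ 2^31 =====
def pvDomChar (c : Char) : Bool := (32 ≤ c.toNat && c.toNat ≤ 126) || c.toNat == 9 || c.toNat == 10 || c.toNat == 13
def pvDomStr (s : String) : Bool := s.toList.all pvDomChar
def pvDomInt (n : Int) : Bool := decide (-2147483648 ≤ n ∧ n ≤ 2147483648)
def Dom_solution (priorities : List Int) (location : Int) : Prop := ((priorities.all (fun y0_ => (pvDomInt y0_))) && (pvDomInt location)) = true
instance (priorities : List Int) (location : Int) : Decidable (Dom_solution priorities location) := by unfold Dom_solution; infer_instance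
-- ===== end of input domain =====

-- B iterates once over the precomputed descending sort instead of rescanning max()
-- on every queue pop (objective: faster).

-- ===== PORT A =====
-- A's while-loop; the Nat argument is a fuel guard making the recursion total
-- (the loop pops the current maximum within one pass of the queue, so the
-- fuel chosen in `solution` below is never exhausted).
def loopA : Nat → List Int → Int → Int → Int
  | 0, _, _, answer => answer
  | _ + 1, [], _, answer => answer
  | f + 1, l :: t, location, answer =>
    -- m = max(queue)  (queue is nonempty here, so max? is some)
    let m := (PySem.List.max? (l :: t) (fun x => x)).getD 0
    let location' := location - 1
    if l ≠ m then
      let q' := t ++ [l]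
      loopA f q' (if location' < 0 then (q'.length : Int) - 1 else location') answer
    else
      if location' < 0 then answer + 1
      else loopA f t location' (answer + 1)

def solution (priorities : List Int) (location : Int) : Int :=
  loopA (priorities.length * priorities.length + priorities.length + 1) priorities location 0

-- ===== PORT B =====
-- B's inner `while queue[0] != top` rotation loop; the fuel (called with the queue
-- length) is a totality guard, never exhausted since `top` is always in the queue;
-- the [] branch is Python's IndexError on queue[0], likewise unreachable.
def rotB : Nat → List Int → Int → Int → (List Int × Int)
  | 0, q, location, _ => (q, location)
  | _ + 1, [], location, _ => ([], location)
  | f + 1, h :: t, location, top =>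
    if h ≠ top then
      let q' := t ++ [h]
      let location' := location - 1
      rotB f q' (if location' < 0 then (q'.length : Int) - 1 else location') top
    else (h :: t, location)

-- B's outer `for top in sorted(priorities, reverse=True)` loop.
def outB : List Int → List Int → Int → Int → Int
  | [], _, _, answer => answer
  | top :: rest, q, location, answer =>
    let r := rotB q.length q location top
    match r.1 with
    | [] => answer          -- queue.popleft() IndexError in Python; unreachable
    | _ :: t =>
      let location' := r.2 - 1
      let answer' := answer + 1
      if location' < 0 then answer' else outB rest t location' answer'

def solution_alt (priorities : List Int) (location : Int) : Int :=
  outB (PySem.List.sorted priorities (fun x => x) true) priorities location 0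

-- ===== PRECONDITION & SPEC =====
def Spec_solution (priorities : List Int) (location : Int) (out : Int) : Prop := out = solution_alt priorities location
instance (priorities : List Int) (location : Int) (out : Int) : Decidable (Spec_solution priorities location out) := by unfold Spec_solution; infer_instance

-- ===== CLAIM (what is proved, stated in full; the proofs are below) =====
def Claim_equal_solution : Prop := ∀ (priorities : List Int) (location : Int), Dom_solution priorities location → Spec_solution priorities location (solution priorities location)

-- ===== LEMMAS AND PROOFS =====

-- A's max(queue) equals `top` when `top` is in the queue and bounds it.
theorem pv_max_eq (l : Int) (t : List Int) (top : Int)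
    (hmem : top ∈ l :: t) (hub : ∀ y ∈ l :: t, y ≤ top) :
    (PySem.List.max? (l :: t) (fun x => x)).getD 0 = top := by
  rcases h : PySem.List.max? (l :: t) (fun x : Int => x) with _ | m
  · exact absurd ((PySem.List.max?_eq_none_iff _ _).mp h) (by simp)
  · have h1 : m ≤ top := hub m (PySem.List.max?_mem h)
    have h2 : top ≤ m := PySem.List.max?_isMax h _ hmem
    simpa using le_antisymm h1 h2

-- Rotating the queue to the next occurrence of the current maximum `top` is
-- exactly the sequence of A's requeue steps (same queue, same location updates).
theorem pv_rot_eq (top : Int) :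
    ∀ (k : Nat) (q : List Int) (loc : Int) (fB : Nat),
      q.idxOf top = k → top ∈ q → (∀ y ∈ q, y ≤ top) → k < fB →
      ∃ (t' : List Int) (locr : Int),
        rotB fB q loc top = (top :: t', locr) ∧
        (top :: t').Perm q ∧
        (∀ (fA : Nat) (ans : Int), k < fA →
          loopA fA q loc ans = loopA (fA - k) (top :: t') locr ans) := by
  intro k
  induction k with
  | zero =>
    intro q loc fB hk hmem _hub hfB
    rcases q with _ | ⟨h, t⟩
    · simp at hmem
    · have hh : h = top := by
        by_contra hne
        rw [List.idxOf_cons_ne _ hne] at hk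
        omega
      subst hh
      rcases fB with _ | f
      · omega
      · exact ⟨t, loc, by simp [rotB], List.Perm.refl _, fun fA ans _ => by simp⟩
  | succ k ih =>
    intro q loc fB hk hmem hub hfB
    rcases q with _ | ⟨h, t⟩
    · simp at hmem
    · have hne : h ≠ top := by
        intro hh
        rw [hh, List.idxOf_cons_self] at hk
        omega
      have hmem' : top ∈ t := by
        rcases List.mem_cons.mp hmem with hh | hh
        · exact absurd hh.symm hne
        · exact hh
      have hk' : (t ++ [h]).idxOf top = k := by
        have h1 : (t ++ [h]).idxOf top = t.idxOf top := List.idxOf_append_of_mem hmem'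
        have h2 : (h :: t).idxOf top = t.idxOf top + 1 := List.idxOf_cons_ne _ hne
        omega
      have hmem'' : top ∈ t ++ [h] := List.mem_append_left _ hmem'
      have hub' : ∀ y ∈ t ++ [h], y ≤ top := by
        intro y hy
        rcases List.mem_append.mp hy with hy | hy
        · exact hub y (List.mem_cons_of_mem _ hy)
        · simp at hy; subst hy; exact hub _ List.mem_cons_self
      rcases fB with _ | f
      · omega
      · obtain ⟨t', locr, hrot, hperm, hloop⟩ :=
          ih (t ++ [h]) (if loc - 1 < 0 then ((t ++ [h]).length : Int) - 1 else loc - 1)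
            f hk' hmem'' hub' (by omega)
        refine ⟨t', locr, ?_, hperm.trans (List.perm_append_singleton h t), ?_⟩
        · rw [rotB, if_pos hne]
          exact hrot
        · intro fA ans hfA
          rcases fA with _ | g
          · omega
          · have hmax := pv_max_eq h t top hmem hub
            rw [loopA, hmax, if_pos hne]
            have := hloop g ans (by omega)
            rw [this]
            congr 1
            omega

-- Main correspondence: with enough fuel, A's loop over the queue equals B's
-- iteration over the descending sorted suffix that remains to be printed.
theorem pv_main :
    ∀ (suffix : List Int) (q : List Int) (loc ans : Int) (fA : Nat),
      suffix.Pairwise (fun a b => b ≤ a) → suffix.Perm q →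
      q.length * q.length + q.length < fA →
      loopA fA q loc ans = outB suffix q loc ans := by
  intro suffix
  induction suffix with
  | nil =>
    intro q loc ans fA _ hperm hfA
    have hq : q = [] := hperm.symm.eq_nil
    subst hq
    rcases fA with _ | f
    · omega
    · simp [loopA, outB]
  | cons top rest ih =>
    intro q loc ans fA hpw hperm hfA
    have hlen : rest.length + 1 = q.length := by
      have := hperm.length_eq; simpa using this
    have hmem : top ∈ q := hperm.subset List.mem_cons_self
    have hub : ∀ y ∈ q, y ≤ top := by
      intro y hy
      rcases List.mem_cons.mp (hperm.symm.subset hy) with hh | hh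
      · exact le_of_eq hh
      · exact (List.pairwise_cons.mp hpw).1 y hh
    have hkq : q.idxOf top < q.length := List.idxOf_lt_length_of_mem hmem
    obtain ⟨t', locr, hrot, hpermr, hloop⟩ :=
      pv_rot_eq top (q.idxOf top) q loc q.length rfl hmem hub hkq
    have hsq : q.length ≤ q.length * q.length + q.length := Nat.le_add_left _ _
    have hfA1 : q.idxOf top < fA := by omega
    rw [hloop fA ans hfA1]
    have houtB : outB (top :: rest) q loc ans =
        (if locr - 1 < 0 then ans + 1 else outB rest t' (locr - 1) (ans + 1)) := by
      rw [outB, hrot]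
    rw [houtB]
    have hg : ∃ g : Nat, fA - q.idxOf top = g + 1 := ⟨fA - q.idxOf top - 1, by omega⟩
    obtain ⟨g, hgeq⟩ := hg
    rw [hgeq]
    have hmaxr := pv_max_eq top t' top List.mem_cons_self
      (fun y hy => hub y (hpermr.subset hy))
    rw [loopA, hmaxr, if_neg (not_not_intro rfl)]
    by_cases hloc : locr - 1 < 0
    · rw [if_pos hloc, if_pos hloc]
    · rw [if_neg hloc, if_neg hloc]
      have hlent : t'.length = rest.length := by
        have := hpermr.length_eq
        simp only [List.length_cons] at this
        omega
      refine ih t' (locr - 1) (ans + 1) g (List.pairwise_cons.mp hpw).2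
        (((List.perm_cons top).mp (hperm.trans hpermr.symm))) ?_
      have hidx : q.idxOf top ≤ rest.length := by omega
      have hfA' : (rest.length + 1) * (rest.length + 1) + (rest.length + 1) < fA := by
        rw [hlen]; exact hfA
      have hfAeq : fA = g + 1 + q.idxOf top := by omega
      rw [hlent]
      nlinarith

-- ===== VERDICT (by name: the statement is the Claim_ definition above) =====
theorem solution_spec : Claim_equal_solution := by
  intro priorities location _hdom
  unfold Spec_solution solution solution_alt
  exact pv_main (PySem.List.sorted priorities (fun x => x) true) priorities location 0 _
    (by simpa using PySem.List.sorted_pairwise_rev priorities (fun x => x))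
    (PySem.List.sorted_perm priorities (fun x => x) true)
    (by omega)
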